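-- pv_equiv track=rewrite | github.com/gabriel-combe/WORDL | Wordl.py | greenCheck
-- ===== SOURCE A (Python) =====
-- def greenCheck(word, mask_word):
--     guess_state = []
--     for i in range(len(word)):
--         guess_state.append(0)
--         for j in range(len(mask_word)):
--             if word[i] == mask_word[j] and i==j:
--                 guess_state[i] = 2
--                 mask_word[j] = '_'
--                 break
--     return guess_state
-- ===== SOURCE B (Python) =====
-- def greenCheck(word, mask_word):
--     guess_state = []
--     for i, c in enumerate(word):
--         if i < len(mask_word) and mask_word[i] == c:
--             guess_state.append(2)
--             mask_word[i] = '_'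
--         else:
--             guess_state.append(0)
--     return guess_state
-- ===== Notes on version B (the rewrite author's own statement) =====
-- stated objective: faster
-- what changed: Replaced the nested scan over all mask positions (where only j==i can ever match) by a single pass comparing word[i] with mask_word[i] directly; same return value and same in-place mutation of mask_word.
import Mathlib
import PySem

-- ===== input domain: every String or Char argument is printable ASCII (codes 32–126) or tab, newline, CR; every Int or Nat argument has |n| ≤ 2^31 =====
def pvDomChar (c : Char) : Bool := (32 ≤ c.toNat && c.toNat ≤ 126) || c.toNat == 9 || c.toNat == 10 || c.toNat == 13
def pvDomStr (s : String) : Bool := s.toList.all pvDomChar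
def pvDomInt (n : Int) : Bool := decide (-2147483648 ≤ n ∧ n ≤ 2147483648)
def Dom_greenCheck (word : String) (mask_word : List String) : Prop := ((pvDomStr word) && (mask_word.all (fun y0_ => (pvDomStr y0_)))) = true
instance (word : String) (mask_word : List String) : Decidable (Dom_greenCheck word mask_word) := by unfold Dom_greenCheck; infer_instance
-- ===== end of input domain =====

-- B replaces A's inner scan over all mask positions by a single pass comparing word[i] with
-- mask_word[i]; equivalence proved for the RETURN value (both programs also perform the same
-- in-place mutation of mask_word, which is not modelled here).

-- ===== PORT A =====
-- inner loop 'for j in range(len(mask_word)): if word[i]==mask_word[j] and i==j: ...; break'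
-- returns the j at which the break fires (none = loop runs to completion)
def gcFind (wch : String) (i : Int) (mask : List String) : List Int → Option Int
  | [] => none
  | j :: rest =>
    if wch = PySem.List.pyGetD mask j "" ∧ i = j then some j
    else gcFind wch i mask rest

def gcStepA (w : List Char) (st : List Int × List String) (i : Int) : List Int × List String :=
  let gs := st.1 ++ [(0 : Int)]
  let mask := st.2
  match gcFind (String.ofList [PySem.List.pyGetD w i ' ']) i mask (PySem.List.pyRange 0 (mask.length : Int) 1) with
  | some j => (PySem.List.pySetD gs i 2, PySem.List.pySetD mask j "_")
  | none => (gs, mask)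

def greenCheck (word : String) (mask_word : List String) : List Int :=
  ((PySem.List.pyRange 0 (word.toList.length : Int) 1).foldl (gcStepA word.toList) ([], mask_word)).1

-- ===== PORT B =====
def gcStepB (st : List Int × List String) (ic : Int × Char) : List Int × List String :=
  if ic.1 < (st.2.length : Int) ∧ PySem.List.pyGetD st.2 ic.1 "" = String.ofList [ic.2] then
    (st.1 ++ [(2 : Int)], PySem.List.pySetD st.2 ic.1 "_")
  else
    (st.1 ++ [(0 : Int)], st.2)

def greenCheck_alt (word : String) (mask_word : List String) : List Int :=
  ((PySem.List.enumerate word.toList 0).foldl gcStepB ([], mask_word)).1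

-- ===== PRECONDITION & SPEC =====
def Spec_greenCheck (word : String) (mask_word : List String) (out : List Int) : Prop := out = greenCheck_alt word mask_word
instance (word : String) (mask_word : List String) (out : List Int) : Decidable (Spec_greenCheck word mask_word out) := by unfold Spec_greenCheck; infer_instance

-- ===== CLAIM (what is proved, stated in full; the proofs are below) =====
def Claim_equal_greenCheck : Prop := ∀ (word : String) (mask_word : List String), Dom_greenCheck word mask_word → Spec_greenCheck word mask_word (greenCheck word mask_word)

-- ===== LEMMAS AND PROOFS =====

-- A's inner loop finds exactly index i (the 'i==j' conjunct forces it), when it is in range and matches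
theorem gcFind_eq (wch : String) (i : Int) (mask : List String) (js : List Int) :
    gcFind wch i mask js =
      if i ∈ js ∧ wch = PySem.List.pyGetD mask i "" then some i else none := by
  induction js with
  | nil => simp [gcFind]
  | cons j rest ih =>
    by_cases hj : wch = PySem.List.pyGetD mask j "" ∧ i = j
    · obtain ⟨hw, hi⟩ := hj
      subst hi
      rw [gcFind, if_pos ⟨hw, rfl⟩, if_pos ⟨List.mem_cons_self, hw⟩]
    · rw [gcFind, if_neg hj, ih]
      by_cases hm : i ∈ rest ∧ wch = PySem.List.pyGetD mask i ""
      · rw [if_pos hm, if_pos ⟨List.mem_cons_of_mem _ hm.1, hm.2⟩]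
      · rw [if_neg hm, if_neg ?_]
        rintro ⟨hmem, hc⟩
        rcases List.mem_cons.mp hmem with h | h
        · exact hj ⟨h ▸ hc, h⟩
        · exact hm ⟨h, hc⟩

theorem set_append_length {α : Type} (gs : List α) (x y : α) :
    (gs ++ [x]).set gs.length y = gs ++ [y] := by
  induction gs with
  | nil => rfl
  | cons a gs ih => simp [ih]

-- one step of A, on a state whose result list already has length n, equals one step of B
theorem step_eq (w : List Char) (n : Nat) (gs : List Int) (mask : List String)
    (hgs : gs.length = n) :
    gcStepA w (gs, mask) (n : Int) = gcStepB (gs, mask) ((n : Int), PySem.List.pyGetD w (n : Int) ' ') := by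
  have hnn : (0 : Int) ≤ (n : Int) := Int.natCast_nonneg n
  simp only [gcStepA, gcStepB, gcFind_eq, PySem.List.mem_pyRange_one]
  by_cases hlt : (n : Int) < (mask.length : Int)
  · by_cases hm : PySem.List.pyGetD mask (n : Int) "" = String.ofList [PySem.List.pyGetD w (n : Int) ' ']
    · rw [if_pos ⟨⟨hnn, hlt⟩, hm.symm⟩, if_pos ⟨hlt, hm⟩]
      have h1 : PySem.List.pySetD (gs ++ [(0 : Int)]) (n : Int) 2 = gs ++ [2] := by
        rw [PySem.List.pySetD_natCast, ← hgs]
        exact set_append_length gs 0 2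
      simp [h1]
    · rw [if_neg (by rintro ⟨_, h⟩; exact hm h.symm), if_neg (by rintro ⟨_, h⟩; exact hm h)]
  · rw [if_neg (by rintro ⟨⟨_, h⟩, _⟩; exact hlt h), if_neg (by rintro ⟨h, _⟩; exact hlt h)]

theorem gcStepB_len (gs : List Int) (m : List String) (ic : Int × Char) :
    (gcStepB (gs, m) ic).1.length = gs.length + 1 := by
  simp only [gcStepB]; split_ifs <;> simp

-- the two folds over the first n indices produce equal states, with result list of length n
theorem fold_eq (w : List Char) (mask : List String) (n : Nat) :
    (PySem.List.pyRange 0 (n : Int) 1).foldl (gcStepA w) ([], mask) =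
      ((PySem.List.pyRange 0 (n : Int) 1).map (fun j => (j, PySem.List.pyGetD w j ' '))).foldl gcStepB ([], mask) ∧
    ((PySem.List.pyRange 0 (n : Int) 1).foldl (gcStepA w) ([], mask)).1.length = n := by
  induction n with
  | zero => simp [PySem.List.pyRange]
  | succ n ih =>
    obtain ⟨heq, hlen⟩ := ih
    have hr : PySem.List.pyRange 0 ((n : Int) + 1) 1 = PySem.List.pyRange 0 (n : Int) 1 ++ [(n : Int)] :=
      PySem.List.pyRange_one_succ_right (Int.natCast_nonneg n)
    have hcast : ((n + 1 : Nat) : Int) = (n : Int) + 1 := by push_cast; ring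
    rw [hcast, hr, List.map_append, List.foldl_append, List.foldl_append, ← heq]
    set st := (PySem.List.pyRange 0 (n : Int) 1).foldl (gcStepA w) ([], mask) with hst
    have hstep := step_eq w n st.1 st.2 hlen
    simp only [List.map_cons, List.map_nil, List.foldl_cons, List.foldl_nil]
    constructor
    · rw [show gcStepA w st (n : Int) = gcStepA w (st.1, st.2) (n : Int) from rfl, hstep]
    · rw [show gcStepA w st (n : Int) = gcStepA w (st.1, st.2) (n : Int) from rfl, hstep,
        gcStepB_len, hlen]

-- ===== VERDICT (by name: the statement is the Claim_ definition above) =====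
theorem greenCheck_spec : Claim_equal_greenCheck := by
  intro word mask _
  unfold Spec_greenCheck greenCheck greenCheck_alt
  rw [PySem.List.enumerate_eq_map_pyRange (d := ' ')]
  exact congrArg Prod.fst (fold_eq word.toList mask word.toList.length).1
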